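-- pv_equiv track=rewrite | github.com/appliud/phony_graph | experiment/方向编码式字符.py | decode_directions
-- ===== SOURCE A (Python) =====
-- def decode_directions(start_x, start_y, directions):
--     x, y = start_x, start_y
--     path = [(x, y)]
--     direction_map = {
--         0: (1, 0),   # 向右 (E)
--         1: (1, 1),   # 右上 (NE)
--         2: (0, 1),   # 向上 (N)
--         3: (-1, 1),  # 左上 (NW)
--         4: (-1, 0),  # 向左 (W)
--         5: (-1, -1), # 左下 (SW)
--         6: (0, -1),  # 向下 (S)
--         7: (1, -1)   # 右下 (SE)
--     }
--
--     for direction in directions: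
--         dx, dy = direction_map[direction]
--         x += dx
--         y += dy
--         path.append((x, y))
--
--     return path
-- ===== SOURCE B (Python) =====
-- # Per-axis delta tables indexed by direction code; the path is built as two
-- # independent per-axis coordinate sequences that are zipped together.
-- DX = (1, 1, 0, -1, -1, -1, 0, 1)
-- DY = (0, 1, 1, 1, 0, -1, -1, -1)
--
-- def _axis(start, table, directions):
--     coords = [start]
--     for d in directions:
--         coords.append(coords[-1] + table[d])
--     return coords
--
-- def decode_directions(start_x, start_y, directions):
--     return list(zip(_axis(start_x, DX, directions),
--                     _axis(start_y, DY, directions)))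
-- ===== Notes on version B (the rewrite author's own statement) =====
-- stated objective: alternative
-- what changed: Instead of one stateful loop carrying (x, y) and appending pairs under a dict lookup, B indexes two per-axis delta tuples and builds the x- and y-coordinate sequences as two independent running sums, then zips them into the path.
import Mathlib
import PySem

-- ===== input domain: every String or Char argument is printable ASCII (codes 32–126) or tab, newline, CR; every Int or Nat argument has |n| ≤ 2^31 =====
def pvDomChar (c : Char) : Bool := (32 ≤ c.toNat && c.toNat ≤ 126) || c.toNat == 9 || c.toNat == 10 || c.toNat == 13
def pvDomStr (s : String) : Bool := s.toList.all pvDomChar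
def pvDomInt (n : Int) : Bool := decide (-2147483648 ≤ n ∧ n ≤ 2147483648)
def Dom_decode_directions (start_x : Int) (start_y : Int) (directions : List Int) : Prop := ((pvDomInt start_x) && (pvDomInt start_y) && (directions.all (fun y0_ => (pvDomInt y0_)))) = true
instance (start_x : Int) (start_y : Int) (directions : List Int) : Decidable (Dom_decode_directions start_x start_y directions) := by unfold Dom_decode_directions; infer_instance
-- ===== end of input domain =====

-- B replaces A's single stateful (x, y, path) loop with a dict lookup by two per-axis
-- delta tables, two independent per-axis running sums and a zip; same return value on Pre_.

-- ===== PORT A =====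
-- A's dict lookup direction_map[direction]; none = KeyError (excluded by Pre_)
def dirMapA (d : Int) : Option (Int × Int) :=
  if d = 0 then some (1, 0) else if d = 1 then some (1, 1)
  else if d = 2 then some (0, 1) else if d = 3 then some (-1, 1)
  else if d = 4 then some (-1, 0) else if d = 5 then some (-1, -1)
  else if d = 6 then some (0, -1) else if d = 7 then some (1, -1) else none

-- A's for-loop over directions with state (x, y, path)
def goA (x y : Int) (path : List (Int × Int)) : List Int → List (Int × Int)
  | [] => path
  | d :: rest =>
    match dirMapA d with
    | some (dx, dy) => goA (x + dx) (y + dy) (path ++ [(x + dx, y + dy)]) rest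
    | none => path  -- KeyError in Python; unreachable under Pre_

def decode_directions (start_x : Int) (start_y : Int) (directions : List Int) : List (Int × Int) :=
  goA start_x start_y [(start_x, start_y)] directions

-- ===== PORT B =====
-- B's per-axis delta tables DX, DY (tuples indexed by the direction code)
def tabDX : List Int := [1, 1, 0, -1, -1, -1, 0, 1]
def tabDY : List Int := [0, 1, 1, 1, 0, -1, -1, -1]

-- B's _axis: coords = [start]; for d: coords.append(coords[-1] + table[d]).
-- table[d] is Python tuple indexing → PySem.List.pyGet?; none = IndexError (excluded by Pre_)
def axisB (last : Int) (table : List Int) : List Int → List Int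
  | [] => [last]
  | d :: ds =>
    match PySem.List.pyGet? table d with
    | some delta => last :: axisB (last + delta) table ds
    | none => [last]  -- IndexError in Python; unreachable under Pre_

def decode_directions_alt (start_x : Int) (start_y : Int) (directions : List Int) : List (Int × Int) :=
  List.zip (axisB start_x tabDX directions) (axisB start_y tabDY directions)

-- ===== PRECONDITION & SPEC =====
-- Pre_ excludes exactly the inputs where A's dict lookup raises KeyError (codes outside 0..7).
def Pre_decode_directions (start_x : Int) (start_y : Int) (directions : List Int) : Prop :=
  ∀ d ∈ directions, 0 ≤ d ∧ d ≤ 7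
instance (start_x : Int) (start_y : Int) (directions : List Int) : Decidable (Pre_decode_directions start_x start_y directions) := by unfold Pre_decode_directions; infer_instance

def pvWitness_decode_directions : Int × Int × List Int := (2, -1, [0, 1, 7, 4, 6])

def Spec_decode_directions (start_x : Int) (start_y : Int) (directions : List Int) (out : List (Int × Int)) : Prop := out = decode_directions_alt start_x start_y directions
instance (start_x : Int) (start_y : Int) (directions : List Int) (out : List (Int × Int)) : Decidable (Spec_decode_directions start_x start_y directions out) := by unfold Spec_decode_directions; infer_instance

-- ===== CLAIM (what is proved, stated in full; the proofs are below) =====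
def Claim_equal_decode_directions : Prop := ∀ (start_x : Int) (start_y : Int) (directions : List Int), Dom_decode_directions start_x start_y directions → Pre_decode_directions start_x start_y directions → Spec_decode_directions start_x start_y directions (decode_directions start_x start_y directions)

-- ===== LEMMAS AND PROOFS =====

theorem alt_head (x y : Int) (ds : List Int) :
    decode_directions_alt x y ds = (x, y) :: (decode_directions_alt x y ds).tail := by
  cases ds with
  | nil => rfl
  | cons d rest =>
    unfold decode_directions_alt axisB
    cases PySem.List.pyGet? tabDX d <;> cases PySem.List.pyGet? tabDY d <;> rfl

theorem alt_cons (x y d : Int) (rest : List Int) (h0 : 0 ≤ d) (h7 : d ≤ 7)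
    (dx dy : Int) (hm : dirMapA d = some (dx, dy)) :
    decode_directions_alt x y (d :: rest)
      = (x, y) :: decode_directions_alt (x + dx) (y + dy) rest := by
  unfold decode_directions_alt
  interval_cases d <;>
    (simp only [dirMapA, show (0:Int) ≠ 1 by decide, if_true, if_false, reduceIte,
       Option.some.injEq, Prod.mk.injEq] at hm
     obtain ⟨rfl, rfl⟩ := hm
     simp [axisB, tabDX, tabDY, PySem.List.pyGet?, PySem.List.pyIdx?])

theorem goA_eq (ds : List Int) : ∀ (x y : Int) (path : List (Int × Int)),
    (∀ d ∈ ds, 0 ≤ d ∧ d ≤ 7) →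
    goA x y path ds = path ++ (decode_directions_alt x y ds).tail := by
  induction ds with
  | nil => intro x y path _; simp [goA]; rfl
  | cons d rest ih =>
    intro x y path h
    have hd := h d (List.mem_cons_self ..)
    have hm : ∃ dx dy, dirMapA d = some (dx, dy) := by
      obtain ⟨h0, h7⟩ := hd; interval_cases d <;> exact ⟨_, _, rfl⟩
    obtain ⟨dx, dy, hm⟩ := hm
    rw [goA, hm]
    show goA (x + dx) (y + dy) (path ++ [(x + dx, y + dy)]) rest = _
    rw [ih _ _ _ (fun e he => h e (List.mem_cons_of_mem _ he))]
    rw [alt_cons x y d rest hd.1 hd.2 dx dy hm, List.tail_cons, List.append_assoc]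
    congr 1
    exact (alt_head ..).symm

-- ===== VERDICT (by name: the statement is the Claim_ definition above) =====
theorem decode_directions_spec : Claim_equal_decode_directions := by
  intro sx sy ds _ hpre
  unfold Spec_decode_directions decode_directions
  rw [goA_eq ds sx sy _ hpre, List.singleton_append, ← alt_head]
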